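-- pv_equiv track=rewrite | github.com/tomlxq/ps_py | hello.py | sumStopBus
-- ===== SOURCE A (Python) =====
-- from typing import List, Optional
--
-- def sumStopBus(nums: List[int]) -> List[int]:
--     left = total = 0
--     size = len(nums)
--     for read in range(size):
--         if read == size - 1 or nums[read] != nums[read + 1]:
--             if nums[read] == '0':
--                 left = read + 1
--                 continue
--             num = read - left + 1
--             big = int(num / 3)
--             mid = int((num - big * 3) / 2)
--             small = num - big * 3 - mid * 2
--             total += (big + small + mid)
--             left = read + 1
--     return total
-- ===== SOURCE B (Python) =====
-- from itertools import groupby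
--
--
-- def sumStopBus(nums):
--     total = 0
--     for _value, group in groupby(nums):
--         count = sum(1 for _ in group)
--         total += (count + 2) // 3
--     return total
-- ===== Notes on version B (the rewrite author's own statement) =====
-- stated objective: idiomatic
-- what changed: Replaces the index/left-pointer loop with boundary detection and a big/mid/small arithmetic cascade by iterating over maximal runs via itertools.groupby and adding ceil(count/3) = (count+2)//3 per run.
import Mathlib
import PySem

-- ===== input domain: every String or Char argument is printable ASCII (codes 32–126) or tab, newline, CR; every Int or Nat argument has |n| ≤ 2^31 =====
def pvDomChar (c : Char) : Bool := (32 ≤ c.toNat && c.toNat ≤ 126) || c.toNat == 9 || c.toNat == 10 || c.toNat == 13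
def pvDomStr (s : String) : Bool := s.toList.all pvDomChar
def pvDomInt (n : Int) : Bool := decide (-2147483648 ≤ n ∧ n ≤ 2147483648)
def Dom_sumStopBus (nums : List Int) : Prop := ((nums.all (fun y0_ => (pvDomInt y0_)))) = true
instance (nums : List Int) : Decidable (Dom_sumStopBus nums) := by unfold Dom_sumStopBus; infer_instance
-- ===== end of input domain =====

-- B replaces A's left-pointer loop with boundary detection by iterating over maximal runs
-- (itertools.groupby) and adding (count+2)//3 per run; equivalence of return values is proved.

-- ===== PORT A =====
-- Loop body of A's `for read in range(size)`; state is (left, total).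
-- `int(num / 3)` / `int(... / 2)` truncate Python float true division toward zero, which is
-- exactly Int.tdiv at these magnitudes (num is at most the list length).
def sumStopBusStep (nums : List Int) (size : Int) (st : Int × Int) (read : Int) : Int × Int :=
  if read = size - 1 ∨ ¬ ((PySem.List.pyGet? nums read).getD 0 = (PySem.List.pyGet? nums (read + 1)).getD 0) then
    -- Python's `if nums[read] == '0'` compares an int with the str '0': always False, never fires.
    let num := read - st.1 + 1
    let big := Int.tdiv num 3
    let mid := Int.tdiv (num - big * 3) 2
    let small := num - big * 3 - mid * 2
    (read + 1, st.2 + (big + small + mid))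
  else st

def sumStopBus (nums : List Int) : Int :=
  ((PySem.List.pyRange 0 (nums.length : Int) 1).foldl
    (sumStopBusStep nums (nums.length : Int)) (0, 0)).2

-- ===== PORT B =====
-- groupby's next maximal run: (length of the run of x at the front of x::l, remainder of l).
def pvRun (x : Int) : List Int → Nat × List Int
  | [] => (1, [])
  | y :: ys => if y = x then ((pvRun x ys).1 + 1, (pvRun x ys).2) else (1, y :: ys)

theorem pvRun_length_le (x : Int) (l : List Int) : (pvRun x l).2.length ≤ l.length := by
  induction l with
  | nil => simp [pvRun]
  | cons y ys ih => simp only [pvRun]; split <;> simp <;> omega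

-- Source B: for each maximal run found by groupby, total += (count + 2) // 3.
def sumStopBus_alt : List Int → Int
  | [] => 0
  | x :: xs =>
    PySem.Int.floordiv (((pvRun x xs).1 : Int) + 2) 3 + sumStopBus_alt (pvRun x xs).2
termination_by l => l.length
decreasing_by have := pvRun_length_le x xs; simp; omega

-- ===== PRECONDITION & SPEC =====
def Spec_sumStopBus (nums : List Int) (out : Int) : Prop := out = sumStopBus_alt nums
instance (nums : List Int) (out : Int) : Decidable (Spec_sumStopBus nums out) := by unfold Spec_sumStopBus; infer_instance

-- ===== CLAIM (what is proved, stated in full; the proofs are below) =====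
def Claim_equal_sumStopBus : Prop := ∀ (nums : List Int), Dom_sumStopBus nums → Spec_sumStopBus nums (sumStopBus nums)

-- ===== LEMMAS AND PROOFS =====

theorem pvRun_spec (x : Int) (l : List Int) :
    l = List.replicate ((pvRun x l).1 - 1) x ++ (pvRun x l).2 ∧ 1 ≤ (pvRun x l).1 ∧
      (∀ y, (pvRun x l).2.head? = some y → y ≠ x) := by
  induction l with
  | nil => simp [pvRun]
  | cons y ys ih =>
    by_cases h : y = x
    · obtain ⟨h1, h2, h3⟩ := ih
      refine ⟨?_, ?_, ?_⟩ <;> simp only [pvRun, if_pos h]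
      · have : (pvRun x ys).1 + 1 - 1 = ((pvRun x ys).1 - 1) + 1 := by omega
        rw [this, List.replicate_succ]
        simpa [h] using h1
      · omega
      · exact h3
    · refine ⟨?_, ?_, ?_⟩ <;> simp [pvRun, if_neg h, h]

theorem foldl_id {α β : Type} (f : β → α → β) (l : List α)
    (h : ∀ a ∈ l, ∀ st, f st a = st) : ∀ st, l.foldl f st = st := by
  induction l with
  | nil => intro st; simp
  | cons a l ih =>
    intro st
    rw [List.foldl_cons, h a (by simp), ih (fun b hb st => h b (by simp [hb]) st)]

-- A's big/mid/small cascade on a positive run length equals ceiling division (c+2)//3.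
theorem runval (c : Int) (hc : 1 ≤ c) :
    Int.tdiv c 3 + (c - Int.tdiv c 3 * 3 - Int.tdiv (c - Int.tdiv c 3 * 3) 2 * 2)
      + Int.tdiv (c - Int.tdiv c 3 * 3) 2 = PySem.Int.floordiv (c + 2) 3 := by
  have h1 : Int.tdiv c 3 = c / 3 := Int.tdiv_eq_ediv_of_nonneg (by omega)
  have h2 : Int.tdiv (c - c / 3 * 3) 2 = (c - c / 3 * 3) / 2 :=
    Int.tdiv_eq_ediv_of_nonneg (by omega)
  have h3 : PySem.Int.floordiv (c + 2) 3 = (c + 2) / 3 :=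
    PySem.Int.floordiv_eq_ediv_of_pos (by norm_num)
  rw [h1, h2, h3]; omega

theorem get_mid (p rest : List Int) (c : Nat) (x : Int) (j : Nat)
    (h1 : p.length ≤ j) (h2 : j < p.length + c) :
    (p ++ (List.replicate c x ++ rest))[j]? = some x := by
  rw [List.getElem?_append_right (by simpa using h1),
      List.getElem?_append_left (by simp; omega)]
  simp [List.getElem?_replicate]; omega

theorem main_aux (nums : List Int) : ∀ (n : Nat) (s p : List Int) (t : Int),
    s.length ≤ n → nums = p ++ s →
    (PySem.List.pyRange (p.length : Int) (nums.length : Int) 1).foldl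
        (sumStopBusStep nums (nums.length : Int)) ((p.length : Int), t)
      = ((nums.length : Int), t + sumStopBus_alt s) := by
  intro n
  induction n with
  | zero =>
    intro s p t hlen hn
    have hs : s = [] := List.eq_nil_of_length_eq_zero (by omega)
    subst hs
    simp at hn
    subst hn
    simp [PySem.List.pyRange_one_eq_nil le_rfl, sumStopBus_alt]
  | succ n ih =>
    intro s p t hlen hn
    match s with
    | [] =>
      simp at hn
      subst hn
      simp [PySem.List.pyRange_one_eq_nil le_rfl, sumStopBus_alt]
    | x :: xs =>
      obtain ⟨⟨c, rest⟩, hp⟩ : ∃ q, pvRun x xs = q := ⟨_, rfl⟩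
      have hspec := pvRun_spec x xs
      rw [hp] at hspec
      obtain ⟨hxs, hc, hhead⟩ := hspec
      simp only at hxs hc hhead
      have hs : x :: xs = List.replicate c x ++ rest := by
        have hrep : List.replicate c x = x :: List.replicate (c - 1) x := by
          conv_lhs => rw [show c = (c - 1) + 1 by omega]
          rw [List.replicate_succ]
        rw [hrep, hxs]
        rfl
      have hn' : nums = p ++ (List.replicate c x ++ rest) := by rw [hn, hs]
      have hlen' : nums.length = p.length + c + rest.length := by simp [hn']; omega
      set a : Int := (p.length : Int) with hadef
      set size : Int := (nums.length : Int) with hszdef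
      have ha0 : (0 : Int) ≤ a := by rw [hadef]; exact Int.natCast_nonneg _
      have hsize : size = a + (c : Int) + (rest.length : Int) := by
        simp only [hadef, hszdef, hlen']
        push_cast
        ring
      have hc1 : (1 : Int) ≤ (c : Int) := by exact_mod_cast hc
      -- index lemma: nums[j] = x for p.length ≤ j < p.length + c
      have hget : ∀ r : Int, a ≤ r → r < a + (c : Int) →
          (PySem.List.pyGet? nums r).getD 0 = x := by
        intro r h1 h2
        have h0 : (0 : Int) ≤ r := le_trans ha0 h1
        rw [show r = ((r.toNat : Nat) : Int) from (Int.toNat_of_nonneg h0).symm,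
          PySem.List.pyGet?_natCast, hn',
          get_mid p rest c x r.toNat (by omega) (by omega)]
        rfl
      -- split the range at the last index of the run
      rw [PySem.List.pyRange_one_append a (a + (c : Int) - 1) size (by omega) (by omega),
        List.foldl_append]
      -- interior of the run: the step is the identity
      rw [foldl_id _ (PySem.List.pyRange a (a + (c : Int) - 1) 1) ?interior]
      case interior =>
        intro r hr st
        rw [PySem.List.mem_pyRange_one] at hr
        have hcond1 : r ≠ size - 1 := by omega
        have hcond2 : (PySem.List.pyGet? nums r).getD 0
            = (PySem.List.pyGet? nums (r + 1)).getD 0 := by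
          rw [hget r hr.1 (by omega), hget (r + 1) (by omega) (by omega)]
        simp [sumStopBusStep, hcond1, hcond2]
      -- the boundary index a + c - 1 fires and closes the run
      rw [PySem.List.pyRange_one_cons (show a + (c : Int) - 1 < size by omega),
        List.foldl_cons]
      have hbound : sumStopBusStep nums size (a, t) (a + (c : Int) - 1)
          = (a + (c : Int), t + PySem.Int.floordiv ((c : Int) + 2) 3) := by
        have hcond : (a + (c : Int) - 1) = size - 1 ∨
            ¬ ((PySem.List.pyGet? nums (a + (c : Int) - 1)).getD 0
              = (PySem.List.pyGet? nums (a + (c : Int) - 1 + 1)).getD 0) := by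
          cases rest with
          | nil =>
            left
            rw [hsize]
            simp
          | cons y ys =>
            right
            have hy : (PySem.List.pyGet? nums (a + (c : Int))).getD 0 = y := by
              have h0 : (0 : Int) ≤ a + (c : Int) := by omega
              rw [show a + (c : Int) = (((a + (c : Int)).toNat : Nat) : Int) from
                  (Int.toNat_of_nonneg h0).symm,
                PySem.List.pyGet?_natCast, hn',
                show (a + (c : Int)).toNat = p.length + c by omega,
                List.getElem?_append_right (by simp),
                List.getElem?_append_right (by simp)]
              simp
            have hx : (PySem.List.pyGet? nums (a + (c : Int) - 1)).getD 0 = x :=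
              hget _ (by omega) (by omega)
            have hne : y ≠ x := hhead y rfl
            rw [hx, show a + (c : Int) - 1 + 1 = a + (c : Int) by ring, hy]
            exact fun h => hne h.symm
        simp only [sumStopBusStep, if_pos hcond]
        rw [show a + (c : Int) - 1 - a + 1 = (c : Int) by ring]
        simp only [Prod.mk.injEq]
        exact ⟨by ring, by rw [runval (c : Int) hc1]⟩
      rw [hbound, show a + (c : Int) - 1 + 1 = a + (c : Int) by ring]
      -- tail: recurse on the remaining suffix
      have hplen : ((p ++ List.replicate c x).length : Int) = a + (c : Int) := by
        simp only [List.length_append, List.length_replicate, hadef]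
        push_cast
        ring
      have hrestlen : rest.length ≤ n := by
        have hxl : xs.length = (c - 1) + rest.length := by rw [hxs]; simp
        simp at hlen
        omega
      have htail := ih rest (p ++ List.replicate c x)
        (t + PySem.Int.floordiv ((c : Int) + 2) 3)
        hrestlen (by rw [hn', List.append_assoc])
      rw [hplen] at htail
      rw [htail, show sumStopBus_alt (x :: xs)
          = PySem.Int.floordiv ((c : Int) + 2) 3 + sumStopBus_alt rest by
        rw [sumStopBus_alt, hp]]
      ring_nf

theorem sumStopBus_eq (nums : List Int) : sumStopBus nums = sumStopBus_alt nums := by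
  have h := main_aux nums nums.length nums [] 0 (le_refl _) (by simp)
  simpa [sumStopBus] using congrArg Prod.snd h

-- ===== VERDICT (by name: the statement is the Claim_ definition above) =====
theorem sumStopBus_spec : Claim_equal_sumStopBus := by
  intro nums _
  unfold Spec_sumStopBus
  exact sumStopBus_eq nums
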